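-- pv_equiv track=rewrite | github.com/WisTiCeJEnT/204111-2021-TA | Lab 09x: Repetition III (extra) [apj-new]/03 Convert many blanks to a single colon.py | to_colon
-- ===== SOURCE A (Python) =====
-- def to_colon(s):
--     res = ''
--     i = 0
--     while i<len(s):
--         if s[i] == ' ':
--             while i<len(s) and s[i] == ' ':
--                 i += 1
--             res += ':'
--         else:
--             res += s[i]
--             i += 1
--     return res
-- ===== SOURCE B (Python) =====
-- def to_colon(s):
--     out = []
--     prev_space = False
--     for c in s:
--         if c == ' ':
--             if not prev_space:
--                 out.append(':')
--         else:
--             out.append(c)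
--         prev_space = (c == ' ')
--     return ''.join(out)
-- ===== Notes on version B (the rewrite author's own statement) =====
-- stated objective: idiomatic
-- what changed: Replaced the index-based while loop with a nested space-skipping while by a single for-over-characters pass that keeps a prev_space flag and appends pieces to a list joined once, instead of quadratic string concatenation.
import Mathlib
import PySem

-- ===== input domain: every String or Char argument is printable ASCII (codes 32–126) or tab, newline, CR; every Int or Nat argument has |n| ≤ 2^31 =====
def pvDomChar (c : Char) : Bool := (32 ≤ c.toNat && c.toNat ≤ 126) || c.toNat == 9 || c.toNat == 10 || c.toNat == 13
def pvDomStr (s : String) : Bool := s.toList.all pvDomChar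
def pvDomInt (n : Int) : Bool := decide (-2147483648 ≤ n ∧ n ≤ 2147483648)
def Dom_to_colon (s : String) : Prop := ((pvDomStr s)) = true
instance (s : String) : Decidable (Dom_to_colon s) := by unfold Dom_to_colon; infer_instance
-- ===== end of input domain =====

-- B replaces A's index/nested-while loop and quadratic string concatenation by a single
-- pass with a prev_space flag (idiomatic; equivalence is on the return value).

-- ===== PORT A =====
-- inner `while i<len(s) and s[i]==' ': i += 1` : skip the run of spaces
def toColonSkip (cs : List Char) : List Char :=
  match cs with
  | [] => []
  | c :: rest => if c = ' ' then toColonSkip rest else c :: rest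

theorem toColonSkip_length_le (cs : List Char) : (toColonSkip cs).length ≤ cs.length := by
  induction cs with
  | nil => simp [toColonSkip]
  | cons c rest ih =>
    simp only [toColonSkip]
    split
    · exact Nat.le_succ_of_le ih
    · simp

-- outer while over the remaining characters, accumulating `res`
def toColonGo (res : List Char) (cs : List Char) : List Char :=
  match cs with
  | [] => res
  | c :: rest =>
    if c = ' ' then
      toColonGo (res ++ [':']) (toColonSkip rest)
    else
      toColonGo (res ++ [c]) rest
termination_by cs.length
decreasing_by
  · exact Nat.lt_succ_of_le (toColonSkip_length_le rest)
  · simp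

def to_colon (s : String) : String := String.ofList (toColonGo [] s.toList)

-- ===== PORT B =====
-- one step of the for loop: state = (out, prev_space)
def toColonStep (st : List Char × Bool) (c : Char) : List Char × Bool :=
  if c = ' ' then
    (if st.2 then st.1 else st.1 ++ [':'], true)
  else
    (st.1 ++ [c], false)

def to_colon_alt (s : String) : String :=
  String.ofList (s.toList.foldl toColonStep ([], false)).1

-- ===== PRECONDITION & SPEC =====
def Spec_to_colon (s : String) (out : String) : Prop := out = to_colon_alt s
instance (s : String) (out : String) : Decidable (Spec_to_colon s out) := by unfold Spec_to_colon; infer_instance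

-- ===== CLAIM (what is proved, stated in full; the proofs are below) =====
def Claim_equal_to_colon : Prop := ∀ (s : String), Dom_to_colon s → Spec_to_colon s (to_colon s)

-- ===== LEMMAS AND PROOFS =====

-- with prev_space = true the fold's output silently drops the leading run of spaces
theorem foldl_step_true (cs : List Char) (out : List Char) :
    (cs.foldl toColonStep (out, true)).1 = ((toColonSkip cs).foldl toColonStep (out, false)).1 := by
  induction cs generalizing out with
  | nil => simp [toColonSkip]
  | cons c rest ih =>
    by_cases hc : c = ' '
    · subst hc
      simp only [List.foldl, toColonStep, toColonSkip]
      exact ih out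
    · simp [List.foldl, toColonStep, toColonSkip, hc]

theorem go_eq_foldl (cs : List Char) (res : List Char) :
    toColonGo res cs = (cs.foldl toColonStep (res, false)).1 := by
  induction hn : cs.length using Nat.strong_induction_on generalizing cs res with
  | _ n ih =>
    match cs with
    | [] => simp [toColonGo]
    | c :: rest =>
      by_cases hc : c = ' '
      · have hlen : (toColonSkip rest).length < n := by
          subst hn
          exact Nat.lt_succ_of_le (toColonSkip_length_le rest)
        subst hc
        have h1 : toColonGo res (' ' :: rest) = toColonGo (res ++ [':']) (toColonSkip rest) := by
          simp [toColonGo]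
        have h2 : (' ' :: rest).foldl toColonStep (res, false)
            = rest.foldl toColonStep (res ++ [':'], true) := by
          simp [List.foldl, toColonStep]
        rw [h1, h2, foldl_step_true]
        exact ih _ hlen _ _ rfl
      · have hlen : rest.length < n := by subst hn; simp
        have h1 : toColonGo res (c :: rest) = toColonGo (res ++ [c]) rest := by
          simp [toColonGo, hc]
        have h2 : (c :: rest).foldl toColonStep (res, false)
            = rest.foldl toColonStep (res ++ [c], false) := by
          simp [List.foldl, toColonStep, hc]
        rw [h1, h2]
        exact ih _ hlen _ _ rfl

-- ===== VERDICT (by name: the statement is the Claim_ definition above) =====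
theorem to_colon_spec : Claim_equal_to_colon := by
  intro s _
  unfold Spec_to_colon to_colon to_colon_alt
  rw [go_eq_foldl]
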